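-- pv_equiv track=rewrite | github.com/robocorp/robotframework-lsp | robocorp-python-ls-core/src/robocorp_ls_core/libs/robocop_lib/robocop/utils/misc.py | remove_robot_vars
-- ===== SOURCE A (Python) =====
-- def next_char_is(string: str, i: int, char: str) -> bool:
--     if not i < len(string) - 1:
--         return False
--     return string[i + 1] == char
--
-- def remove_robot_vars(name: str) -> str:
--     var_start = set("$@%&")
--     brackets = 0
--     open_bracket, close_bracket = "", ""
--     replaced = ""
--     index = 0
--     while index < len(name):
--         if brackets:
--             if name[index] == open_bracket:
--                 brackets += 1
--             elif name[index] == close_bracket: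
--                 brackets -= 1
--             # check if next chars are not ['key']
--             if not brackets and next_char_is(name, index, "["):
--                 brackets += 1
--                 index += 1
--                 open_bracket, close_bracket = "[", "]"
--         # it looks for $ (or other var starter) and then check if next char is { and previous is not escape \
--         elif name[index] in var_start and next_char_is(name, index, "{") and not (index and name[index - 1] == "\\"):
--             open_bracket = "{"
--             close_bracket = "}"
--             brackets += 1
--             index += 1
--         else:
--             replaced += name[index]
--         index += 1
--     return replaced
-- ===== SOURCE B (Python) =====
-- def _skip_group(name, j, ob="{", cb="}"):
--     # name[j] is the char just after the opening bracket; consume until the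
--     # matching close (or end of string), return index just past it
--     depth = 1
--     n = len(name)
--     while j < n and depth:
--         if name[j] == ob:
--             depth += 1
--         elif name[j] == cb:
--             depth -= 1
--         j += 1
--     return j
--
-- def remove_robot_vars(name: str) -> str:
--     out = []
--     n = len(name)
--     i = 0
--     while i < n:
--         c = name[i]
--         if c in "$@%&" and i + 1 < n and name[i + 1] == "{" and not (i and name[i - 1] == "\\"):
--             j = _skip_group(name, i + 2)
--             # chained ['key'] accesses immediately after the closed group
--             while j < n and name[j] == "[":
--                 j = _skip_group(name, j + 1, "[", "]")
--             i = j
--         else: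
--             out.append(c)
--             i += 1
--     return "".join(out)
-- ===== Notes on version B (the rewrite author's own statement) =====
-- stated objective: faster
-- what changed: A threads a cross-iteration bracket/mode state machine (brackets/open_bracket/close_bracket mutated every iteration) and grows the result by repeated string concatenation; B is a plain emit loop that accumulates characters in a list joined once and, at a variable start, consumes the whole balanced brace group plus chained bracket groups at once with a dedicated _skip_group helper.
import Mathlib
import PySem

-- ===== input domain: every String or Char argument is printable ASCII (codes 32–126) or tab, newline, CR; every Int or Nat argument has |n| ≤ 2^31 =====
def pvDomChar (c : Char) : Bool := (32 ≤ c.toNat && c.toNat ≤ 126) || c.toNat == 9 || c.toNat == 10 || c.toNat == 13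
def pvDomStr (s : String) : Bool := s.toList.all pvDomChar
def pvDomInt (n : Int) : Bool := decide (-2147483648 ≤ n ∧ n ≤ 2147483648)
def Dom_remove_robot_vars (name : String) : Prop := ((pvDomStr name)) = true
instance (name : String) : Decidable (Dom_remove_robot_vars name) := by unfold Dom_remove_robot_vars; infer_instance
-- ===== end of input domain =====

-- B replaces A's cross-iteration bracket/mode state machine by a plain emit loop that, at a
-- variable start, consumes the whole balanced brace group and any chained bracket groups at
-- once with a dedicated skip helper, collecting output in a list joined once (objective: a
-- different decomposition; a timing run measured B faster).
-- Both while loops are ported as structural recursion on a fuel argument (initial fuel =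
-- length of the string, enough since the index strictly increases per step): the fuel is only a
-- totality guard, never reached on the stated domain.

-- ===== PORT A =====
-- A's while loop, index-based; acc is 'replaced', b is 'brackets'. Python's initial open/close
-- brackets are the empty string '' (never equal to any char and only read once brackets>0, when
-- they have been reassigned); ported as the dummy char ' ', likewise only read once brackets>0.
def aLoop (s : List Char) : Nat → Nat → Nat → Char → Char → List Char → List Char
  | 0, _, _, _, _, acc => acc
  | f + 1, i, b, ob, cb, acc =>
    if i < s.length then
      if b ≠ 0 then
        if (if s.getD i ' ' = ob then b + 1 else if s.getD i ' ' = cb then b - 1 else b) = 0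
            ∧ i + 1 < s.length ∧ s.getD (i + 1) ' ' = '[' then
          aLoop s f (i + 2) 1 '[' ']' acc
        else
          aLoop s f (i + 1) (if s.getD i ' ' = ob then b + 1 else if s.getD i ' ' = cb then b - 1 else b) ob cb acc
      else if (s.getD i ' ' = '$' ∨ s.getD i ' ' = '@' ∨ s.getD i ' ' = '%' ∨ s.getD i ' ' = '&')
              ∧ i + 1 < s.length ∧ s.getD (i + 1) ' ' = '{'
              ∧ ¬(0 < i ∧ s.getD (i - 1) ' ' = '\\') then
        aLoop s f (i + 2) 1 '{' '}' acc
      else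
        aLoop s f (i + 1) 0 ob cb (acc ++ [s.getD i ' '])
    else acc

def remove_robot_vars (name : String) : String :=
  String.ofList (aLoop name.toList name.toList.length 0 0 ' ' ' ' [])

-- ===== PORT B =====
-- _skip_group: s[j] is the char just after the opening bracket; d is 'depth'
def skipGroup (s : List Char) : Nat → Nat → Char → Char → Nat → Nat
  | 0, j, _, _, _ => j
  | f + 1, j, ob, cb, d =>
    if j < s.length ∧ d ≠ 0 then
      skipGroup s f (j + 1) ob cb
        (if s.getD j ' ' = ob then d + 1 else if s.getD j ' ' = cb then d - 1 else d)
    else j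

-- B's inner while loop that consumes the chained bracket groups after a closed brace group
def skipChain (s : List Char) : Nat → Nat → Nat
  | 0, j => j
  | f + 1, j =>
    if j < s.length ∧ s.getD j ' ' = '[' then
      skipChain s f (skipGroup s s.length (j + 1) '[' ']' 1)
    else j

-- B's outer emit loop
def bLoop (s : List Char) : Nat → Nat → List Char → List Char
  | 0, _, acc => acc
  | f + 1, i, acc =>
    if i < s.length then
      if (s.getD i ' ' = '$' ∨ s.getD i ' ' = '@' ∨ s.getD i ' ' = '%' ∨ s.getD i ' ' = '&')
          ∧ i + 1 < s.length ∧ s.getD (i + 1) ' ' = '{'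
          ∧ ¬(0 < i ∧ s.getD (i - 1) ' ' = '\\') then
        bLoop s f (skipChain s s.length (skipGroup s s.length (i + 2) '{' '}' 1)) acc
      else
        bLoop s f (i + 1) (acc ++ [s.getD i ' '])
    else acc

def remove_robot_vars_alt (name : String) : String :=
  String.ofList (bLoop name.toList name.toList.length 0 [])

-- ===== PRECONDITION & SPEC =====
def Spec_remove_robot_vars (name : String) (out : String) : Prop := out = remove_robot_vars_alt name
instance (name : String) (out : String) : Decidable (Spec_remove_robot_vars name out) := by unfold Spec_remove_robot_vars; infer_instance

-- ===== CLAIM (what is proved, stated in full; the proofs are below) =====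
def Claim_equal_remove_robot_vars : Prop := ∀ (name : String), Dom_remove_robot_vars name → Spec_remove_robot_vars name (remove_robot_vars name)

-- ===== LEMMAS AND PROOFS =====

theorem skipGroup_oob (s : List Char) (ob cb : Char) (f j d : Nat) (h : s.length ≤ j) :
    skipGroup s f j ob cb d = j := by
  cases f with
  | zero => rfl
  | succ f => simp [skipGroup, show ¬ j < s.length by omega]

theorem skipGroup_zero_d (s : List Char) (ob cb : Char) (f j : Nat) :
    skipGroup s f j ob cb 0 = j := by
  cases f with
  | zero => rfl
  | succ f => simp [skipGroup]

theorem skipGroup_ge (s : List Char) (ob cb : Char) :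
    ∀ (f j d : Nat), j ≤ skipGroup s f j ob cb d := by
  intro f
  induction f with
  | zero => intro j d; simp [skipGroup]
  | succ f ih =>
    intro j d
    by_cases hc : j < s.length ∧ d ≠ 0
    · have := ih (j + 1) (if s.getD j ' ' = ob then d + 1 else if s.getD j ' ' = cb then d - 1 else d)
      simp only [skipGroup, if_pos hc]
      omega
    · simp [skipGroup, hc]

theorem skipChain_oob (s : List Char) (f j : Nat) (h : s.length ≤ j) :
    skipChain s f j = j := by
  cases f with
  | zero => rfl
  | succ f => simp [skipChain, show ¬ j < s.length by omega]

theorem skipChain_ge (s : List Char) :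
    ∀ (f j : Nat), j ≤ skipChain s f j := by
  intro f
  induction f with
  | zero => intro j; simp [skipChain]
  | succ f ih =>
    intro j
    by_cases hc : j < s.length ∧ s.getD j ' ' = '['
    · have h1 := skipGroup_ge s '[' ']' s.length (j + 1) 1
      have h2 := ih (skipGroup s s.length (j + 1) '[' ']' 1)
      simp only [skipChain, if_pos hc]
      omega
    · simp only [skipChain]
      rw [if_neg hc]

theorem aLoop_oob (s : List Char) (f i b : Nat) (ob cb : Char) (acc : List Char)
    (h : s.length ≤ i) : aLoop s f i b ob cb acc = acc := by
  cases f with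
  | zero => rfl
  | succ f => simp [aLoop, show ¬ i < s.length by omega]

theorem bLoop_oob (s : List Char) (f i : Nat) (acc : List Char)
    (h : s.length ≤ i) : bLoop s f i acc = acc := by
  cases f with
  | zero => rfl
  | succ f => simp [bLoop, show ¬ i < s.length by omega]

theorem aLoop_irrel (s : List Char) :
    ∀ (f g i b : Nat) (ob cb : Char) (acc : List Char), s.length - i ≤ f → s.length - i ≤ g →
    aLoop s f i b ob cb acc = aLoop s g i b ob cb acc := by
  intro f
  induction f with
  | zero =>
    intro g i b ob cb acc hf hg
    rw [aLoop_oob s 0 i b ob cb acc (by omega), aLoop_oob s g i b ob cb acc (by omega)]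
  | succ f ih =>
    intro g i b ob cb acc hf hg
    cases g with
    | zero =>
      rw [aLoop_oob s (f + 1) i b ob cb acc (by omega), aLoop_oob s 0 i b ob cb acc (by omega)]
    | succ g =>
      by_cases hi : i < s.length
      · simp only [aLoop, if_pos hi]
        by_cases hb : b ≠ 0
        · rw [if_pos hb, if_pos hb]
          by_cases hc : (if s.getD i ' ' = ob then b + 1 else if s.getD i ' ' = cb then b - 1 else b) = 0
              ∧ i + 1 < s.length ∧ s.getD (i + 1) ' ' = '['
          · rw [if_pos hc, if_pos hc]
            exact ih g (i + 2) 1 '[' ']' acc (by omega) (by omega)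
          · rw [if_neg hc, if_neg hc]
            exact ih g (i + 1) _ ob cb acc (by omega) (by omega)
        · rw [if_neg hb, if_neg hb]
          by_cases ht : (s.getD i ' ' = '$' ∨ s.getD i ' ' = '@' ∨ s.getD i ' ' = '%' ∨ s.getD i ' ' = '&')
              ∧ i + 1 < s.length ∧ s.getD (i + 1) ' ' = '{' ∧ ¬(0 < i ∧ s.getD (i - 1) ' ' = '\\')
          · rw [if_pos ht, if_pos ht]
            exact ih g (i + 2) 1 '{' '}' acc (by omega) (by omega)
          · rw [if_neg ht, if_neg ht]
            exact ih g (i + 1) 0 ob cb _ (by omega) (by omega)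
      · simp only [aLoop, if_neg hi]

-- A running in bracket mode (b ≥ 1) consumes exactly what skipGroup skips, then either enters
-- '['-mode right after a '[' continuation or drops back to normal mode.
theorem aLoop_mode (s : List Char) (ob cb : Char) :
    ∀ (f g i b : Nat) (acc : List Char), s.length - i ≤ f → s.length - i ≤ g → b ≠ 0 →
    aLoop s f i b ob cb acc =
      (let j := skipGroup s g i ob cb b
       if j < s.length ∧ s.getD j ' ' = '[' then aLoop s s.length (j + 1) 1 '[' ']' acc
       else aLoop s s.length j 0 ob cb acc) := by
  intro f
  induction f with
  | zero =>
    intro g i b acc hf hg hb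
    rw [aLoop_oob s 0 i b ob cb acc (by omega), skipGroup_oob s ob cb g i b (by omega)]
    rw [if_neg (by omega), aLoop_oob s s.length i 0 ob cb acc (by omega)]
  | succ f ih =>
    intro g i b acc hf hg hb
    by_cases hi : i < s.length
    · cases g with
      | zero => omega
      | succ g =>
        simp only [aLoop, if_pos hi, if_pos hb, skipGroup, if_pos (And.intro hi hb)]
        by_cases hb' : (if s.getD i ' ' = ob then b + 1 else if s.getD i ' ' = cb then b - 1 else b) = 0
        · rw [hb', skipGroup_zero_d s ob cb g (i + 1)]
          by_cases hc : i + 1 < s.length ∧ s.getD (i + 1) ' ' = '['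
          · rw [if_pos ⟨rfl, hc⟩, if_pos hc]
            exact aLoop_irrel s f s.length (i + 2) 1 '[' ']' acc (by omega) (by omega)
          · rw [if_neg (fun h => hc h.2), if_neg hc]
            exact aLoop_irrel s f s.length (i + 1) 0 ob cb acc (by omega) (by omega)
        · rw [if_neg (fun h => hb' h.1)]
          exact ih g (i + 1) _ acc (by omega) (by omega) hb'
    · rw [aLoop_oob s (f + 1) i b ob cb acc (by omega), skipGroup_oob s ob cb g i b (by omega)]
      rw [if_neg (by omega), aLoop_oob s s.length i 0 ob cb acc (by omega)]

-- in normal mode the leftover open/close bracket chars are never read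
theorem aLoop_zero_irrel (s : List Char) (ob cb ob' cb' : Char) :
    ∀ (f i : Nat) (acc : List Char),
    aLoop s f i 0 ob cb acc = aLoop s f i 0 ob' cb' acc := by
  intro f
  induction f with
  | zero => intro i acc; rfl
  | succ f ih =>
    intro i acc
    by_cases hi : i < s.length
    · simp only [aLoop, if_pos hi, ne_eq, not_true_eq_false, if_false]
      split
      · rfl
      · exact ih (i + 1) _
    · simp only [aLoop, if_neg hi]

-- A resumed right after a closed group equals A resumed past all chained '[...]' groups
theorem aLoop_chain (s : List Char) :
    ∀ (f j : Nat) (acc : List Char), s.length - j ≤ f →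
    (if j < s.length ∧ s.getD j ' ' = '[' then aLoop s s.length (j + 1) 1 '[' ']' acc
     else aLoop s s.length j 0 '{' '}' acc) =
      aLoop s s.length (skipChain s f j) 0 '{' '}' acc := by
  intro f
  induction f with
  | zero =>
    intro j acc hf
    rw [if_neg (by omega), skipChain_oob s 0 j (by omega)]
  | succ f ih =>
    intro j acc hf
    by_cases hc : j < s.length ∧ s.getD j ' ' = '['
    · rw [if_pos hc]
      rw [aLoop_mode s '[' ']' s.length s.length (j + 1) 1 acc (by omega) (by omega) one_ne_zero]
      have hge := skipGroup_ge s '[' ']' s.length (j + 1) 1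
      simp only [skipChain, if_pos hc]
      rw [show (aLoop s s.length (skipGroup s s.length (j + 1) '[' ']' 1) 0 '[' ']' acc)
            = aLoop s s.length (skipGroup s s.length (j + 1) '[' ']' 1) 0 '{' '}' acc
          from aLoop_zero_irrel s '[' ']' '{' '}' s.length _ acc]
      exact ih (skipGroup s s.length (j + 1) '[' ']' 1) acc (by omega)
    · rw [if_neg hc]
      simp only [skipChain, if_neg hc]

theorem aLoop_eq_bLoop (s : List Char) :
    ∀ (f g i : Nat) (ob cb : Char) (acc : List Char), s.length - i ≤ f → s.length - i ≤ g →
    aLoop s f i 0 ob cb acc = bLoop s g i acc := by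
  intro f
  induction f with
  | zero =>
    intro g i ob cb acc hf hg
    rw [aLoop_oob s 0 i 0 ob cb acc (by omega), bLoop_oob s g i acc (by omega)]
  | succ f ih =>
    intro g i ob cb acc hf hg
    by_cases hi : i < s.length
    · cases g with
      | zero => omega
      | succ g =>
        simp only [aLoop, bLoop, if_pos hi, ne_eq, not_true_eq_false, if_false]
        split
        · -- variable-expression trigger
          rw [aLoop_irrel s f s.length (i + 2) 1 '{' '}' acc (by omega) (by omega)]
          rw [aLoop_mode s '{' '}' s.length s.length (i + 2) 1 acc (by omega) (by omega) one_ne_zero]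
          rw [aLoop_chain s s.length (skipGroup s s.length (i + 2) '{' '}' 1) acc (by omega)]
          have h1 := skipGroup_ge s '{' '}' s.length (i + 2) 1
          have h2 := skipChain_ge s s.length (skipGroup s s.length (i + 2) '{' '}' 1)
          rw [aLoop_irrel s s.length f (skipChain s s.length (skipGroup s s.length (i + 2) '{' '}' 1)) 0 '{' '}' acc (by omega) (by omega)]
          exact ih g (skipChain s s.length (skipGroup s s.length (i + 2) '{' '}' 1)) '{' '}' acc (by omega) (by omega)
        · exact ih g (i + 1) ob cb _ (by omega) (by omega)
    · rw [aLoop_oob s (f + 1) i 0 ob cb acc (by omega), bLoop_oob s g i acc (by omega)]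

-- ===== VERDICT (by name: the statement is the Claim_ definition above) =====
theorem remove_robot_vars_spec : Claim_equal_remove_robot_vars := by
  intro name _
  show _ = _
  unfold remove_robot_vars remove_robot_vars_alt
  rw [aLoop_eq_bLoop name.toList name.toList.length name.toList.length 0 ' ' ' ' [] (by omega) (by omega)]
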